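-- pv_equiv track=rewrite | github.com/jcp0578/practise-Python | codewar/Strings Mix-4k/Strings Mix.py | count_alpha
-- ===== SOURCE A (Python) =====
-- def count_alpha(hist):
--     out_temp={}
--     for key,value in hist.items():
--         if value :
--             if value in out_temp:
--                 out_temp[value].append(key)
--             else :
--                 out_temp[value]=[key]
--     return out_temp
-- ===== SOURCE B (Python) =====
-- def count_alpha(hist):
--     # collect distinct nonzero values in first-occurrence order, then rescan per value
--     vals = []
--     for v in hist.values():
--         if v and v not in vals:
--             vals.append(v)
--     return {v: [k for k, w in hist.items() if w == v] for v in vals}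
-- ===== Notes on version B (the rewrite author's own statement) =====
-- stated objective: alternative
-- what changed: Replaces the single-pass hash grouping (membership test + append/assign into a dict) with a two-phase collect-then-rescan: first an ordered dedup of the nonzero values, then one comprehension per value filtering hist.items().
import Mathlib
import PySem

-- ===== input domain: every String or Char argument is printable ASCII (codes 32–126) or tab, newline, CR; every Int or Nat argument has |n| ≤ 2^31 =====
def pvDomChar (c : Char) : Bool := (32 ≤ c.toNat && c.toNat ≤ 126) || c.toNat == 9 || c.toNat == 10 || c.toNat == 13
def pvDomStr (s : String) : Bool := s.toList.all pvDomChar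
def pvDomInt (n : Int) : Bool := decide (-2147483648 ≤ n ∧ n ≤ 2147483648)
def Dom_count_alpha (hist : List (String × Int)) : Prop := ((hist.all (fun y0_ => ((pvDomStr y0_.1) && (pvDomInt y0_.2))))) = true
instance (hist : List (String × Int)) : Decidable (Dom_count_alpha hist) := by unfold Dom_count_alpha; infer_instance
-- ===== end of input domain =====

-- B replaces A's single-pass hash grouping by a two-phase decomposition (collect the distinct
-- nonzero values in order, then rescan the items once per value); objective: alternative.

-- ===== PORT A =====
def count_alpha (hist : List (String × Int)) : List (Int × List String) :=
  (hist.foldl (fun out_temp kv =>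
      if kv.2 ≠ 0 then
        if out_temp.contains kv.2 then out_temp.modify kv.2 [] (fun l => l ++ [kv.1])
        else out_temp.insert kv.2 [kv.1]
      else out_temp)
    (PySem.Dict.empty : PySem.Dict Int (List String))).items

-- ===== PORT B =====
def count_alpha_alt (hist : List (String × Int)) : List (Int × List String) :=
  let vals := hist.foldl (fun vals kv =>
      if kv.2 ≠ 0 ∧ kv.2 ∉ vals then vals ++ [kv.2] else vals) ([] : List Int)
  vals.map (fun v => (v, (hist.filter (fun kv => kv.2 == v)).map (fun kv => kv.1)))

-- ===== PRECONDITION & SPEC =====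
def Spec_count_alpha (hist : List (String × Int)) (out : List (Int × List String)) : Prop := out = count_alpha_alt hist
instance (hist : List (String × Int)) (out : List (Int × List String)) : Decidable (Spec_count_alpha hist out) := by unfold Spec_count_alpha; infer_instance

-- ===== CLAIM (what is proved, stated in full; the proofs are below) =====
def Claim_equal_count_alpha : Prop := ∀ (hist : List (String × Int)), Dom_count_alpha hist → Spec_count_alpha hist (count_alpha hist)

-- ===== LEMMAS AND PROOFS =====

-- the nonzero (value, key) pairs of hist, in order (proof-side helper)
def pvPairs (hist : List (String × Int)) : List (Int × String) :=
  (hist.filter (fun kv => kv.2 ≠ 0)).map (fun kv => (kv.2, kv.1))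

-- A's loop body (membership test, then append or fresh singleton) is exactly Dict.modify
lemma stepA_eq_modify (d : PySem.Dict Int (List String)) (k : Int) (s : String) :
    (if d.contains k then d.modify k [] (fun l => l ++ [s]) else d.insert k [s])
      = d.modify k [] (fun l => l ++ [s]) := by
  by_cases h : d.contains k
  · simp [h]
  · rw [if_neg (by simpa using h), PySem.Dict.modify,
      PySem.Dict.getD_of_not_contains _ _ (by simpa using h)]
    rfl

-- A's fold over hist = the canonical modify-fold over pvPairs
lemma foldA_eq (hist : List (String × Int)) (d : PySem.Dict Int (List String)) :
    hist.foldl (fun out_temp kv =>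
      if kv.2 ≠ 0 then
        if out_temp.contains kv.2 then out_temp.modify kv.2 [] (fun l => l ++ [kv.1])
        else out_temp.insert kv.2 [kv.1]
      else out_temp) d
    = (pvPairs hist).foldl (fun d p => d.modify p.1 [] (fun l => l ++ [p.2])) d := by
  induction hist generalizing d with
  | nil => rfl
  | cons kv t ih =>
    rw [List.foldl_cons, ih]
    by_cases h : kv.2 = 0
    · simp [pvPairs, h]
    · have hp : pvPairs (kv :: t) = (kv.2, kv.1) :: pvPairs t := by
        simp [pvPairs, h]
      rw [hp, List.foldl_cons]
      congr 1
      rw [if_pos h]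
      exact stepA_eq_modify d kv.2 kv.1

-- B's vals loop is the ordered dedup (PySem.Set.update) of the nonzero values
lemma foldB_eq (hist : List (String × Int)) (s : PySem.Set Int) :
    hist.foldl (fun vals kv =>
      if kv.2 ≠ 0 ∧ kv.2 ∉ vals then vals ++ [kv.2] else vals) s
    = PySem.Set.update s ((hist.filter (fun kv => kv.2 ≠ 0)).map (fun kv => kv.2)) := by
  induction hist generalizing s with
  | nil => simp [PySem.Set.update]
  | cons kv t ih =>
    rw [List.foldl_cons, ih]
    by_cases h : kv.2 = 0
    · simp [h]
    · have hp : (List.filter (fun kv => decide (kv.2 ≠ 0)) (kv :: t)).map (fun kv => kv.2)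
          = kv.2 :: (List.filter (fun kv => decide (kv.2 ≠ 0)) t).map (fun kv => kv.2) := by
        simp [h]
      rw [hp, PySem.Set.update_cons]
      congr 1
      rw [PySem.Set.add_eq_ite]
      by_cases hm : kv.2 ∈ s <;> simp [hm, h]

-- ===== VERDICT (by name: the statement is the Claim_ definition above) =====
theorem count_alpha_spec : Claim_equal_count_alpha := by
  intro hist _
  show count_alpha hist = count_alpha_alt hist
  simp only [count_alpha, count_alpha_alt]
  rw [foldA_eq, foldB_eq, PySem.Set.update_nil_left]
  rw [PySem.Dict.items_eq_map_keys _
    (PySem.Dict.nodup_keys_foldl_modify_key (pvPairs hist) Prod.fst []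
      (fun _ p l => l ++ [p.2]) _ (by simp [PySem.Dict.keys_empty])) []]
  rw [PySem.Dict.keys_foldl_modify_key]
  have hkeys : List.map Prod.fst (pvPairs hist)
      = (hist.filter (fun kv => decide (kv.2 ≠ 0))).map (fun kv => kv.2) := by
    simp [pvPairs, List.map_map, Function.comp]
  rw [hkeys, PySem.Dict.keys_empty, PySem.Set.update_nil_left]
  apply List.map_congr_left
  intro v hv
  have hv0 : v ≠ 0 := by
    rw [PySem.Set.mem_ofList] at hv
    obtain ⟨kv, hkv, rfl⟩ := List.mem_map.1 hv
    simpa using (List.mem_filter.1 hkv).2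
  rw [PySem.Dict.getD_foldl_modify_append, PySem.Dict.getD_empty]
  simp only [List.nil_append]
  congr 1
  simp only [pvPairs, List.filter_map, List.map_map]
  rw [List.filter_filter]
  apply congrArg
  apply List.filter_congr
  intro kv _
  by_cases hkv : kv.2 = v <;> simp [hkv, hv0, Function.comp]
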